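-- pv_equiv track=rewrite | github.com/Samrfgh/Project-Euler | Problem 31.py | combines_of_coins
-- ===== SOURCE A (Python) =====
-- coins = [1,2,5,10,20,50,100,200]
--
-- def combines_of_coins(coin_start,target):
--     combinations = []
--     if target >= coin_start:
--         for coin in coins:
--             new_target = target - coin
--             if new_target == 0:
--                 combinations.append([coin])
--             elif new_target < coin:
--                 break
--             else:
--                 for i in combines_of_coins(coin_start,new_target):
--                     combinations.append([coin] + i)
--     return combinations
-- ===== SOURCE B (Python) =====
-- from itertools import takewhile
--
-- coins = [1,2,5,10,20,50,100,200]
--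
-- def combines_of_coins(coin_start, target):
--     # Bottom-up DP: table[t] holds the combination list for sub-target t,
--     # computed once, instead of A's exponential re-recursion.
--     if target < coin_start:
--         return []
--     table = {}
--     for t in range(1, target + 1):
--         entry = []
--         if t >= coin_start:
--             for coin in takewhile(lambda c: c == t or 2 * c <= t, coins):
--                 if coin == t:
--                     entry.append([coin])
--                 else:
--                     entry.extend([coin] + tail for tail in table[t - coin])
--         table[t] = entry
--     return table.get(target, [])
-- ===== Notes on version B (the rewrite author's own statement) =====
-- stated objective: alternative
-- what changed: Replaces A's naive recursion (which re-enumerates the same sub-target from scratch at every occurrence) by a bottom-up dynamic-programming table keyed by sub-target, each entry computed once via a takewhile/flat-extend loop over the coins instead of A's break-driven recursive for loop; Pre_ only excludes inputs whose recursion depth makes A raise RecursionError.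
import Mathlib
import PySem

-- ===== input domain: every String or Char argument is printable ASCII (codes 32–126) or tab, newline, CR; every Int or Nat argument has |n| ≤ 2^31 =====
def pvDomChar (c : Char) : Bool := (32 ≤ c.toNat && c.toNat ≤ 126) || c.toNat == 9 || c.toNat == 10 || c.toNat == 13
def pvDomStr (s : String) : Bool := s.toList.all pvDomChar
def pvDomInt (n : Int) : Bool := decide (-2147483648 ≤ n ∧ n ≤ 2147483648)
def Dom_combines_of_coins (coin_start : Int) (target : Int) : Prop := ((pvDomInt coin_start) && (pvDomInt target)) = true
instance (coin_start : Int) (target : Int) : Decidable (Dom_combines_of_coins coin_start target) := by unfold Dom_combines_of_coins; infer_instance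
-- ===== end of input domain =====

-- B replaces A's naive recursion by a bottom-up table keyed by the sub-target, each entry
-- computed once and shared instead of re-recursing (objective: alternative).

-- module constant: coins = [1,2,5,10,20,50,100,200]
def coins : List Int := [1, 2, 5, 10, 20, 50, 100, 200]

-- used by the ports' termination proofs
theorem coins_pos : ∀ c ∈ coins, 1 ≤ c := by decide

-- ===== PORT A =====
-- `combLoop` is A's `for coin in coins: …` with its `break` (returning [] cuts the rest of the
-- loop; appended chunks accumulate by ++). It carries the positivity of the remaining coins,
-- needed only for termination; the computation is A's, step for step.
mutual
def combines_of_coins (coin_start : Int) (target : Int) : List (List Int) :=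
  if coin_start ≤ target then combLoop coin_start target coins coins_pos else []
termination_by (target.toNat, 9)
decreasing_by exact Prod.Lex.right _ (by simp [coins])

def combLoop (coin_start : Int) (target : Int) :
    (cs : List Int) → (∀ c ∈ cs, 1 ≤ c) → List (List Int)
  | [], _ => []
  | c :: rest, h =>
    let nt := target - c
    if nt = 0 then
      [c] :: combLoop coin_start target rest (fun x hx => h x (List.mem_cons_of_mem c hx))
    else if nt < c then
      []   -- break
    else
      (combines_of_coins coin_start nt).map (fun i => c :: i)
        ++ combLoop coin_start target rest (fun x hx => h x (List.mem_cons_of_mem c hx))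
termination_by cs _h => (target.toNat, cs.length)
decreasing_by
  · exact Prod.Lex.right _ (by simp)
  · have hc : 1 ≤ c := h c List.mem_cons_self
    exact Prod.Lex.left _ _ (by omega)
  · exact Prod.Lex.right _ (by simp)
end

-- ===== PORT B =====
-- the entry computed for sub-target t from the table of smaller sub-targets
-- (`tb.getD (t - c) []` is Python's `table[t - coin]`; exact here: that key was always inserted
-- on an earlier iteration, since 1 ≤ t - c < t for every coin the takewhile admits)
def entryAlt (coin_start : Int) (t : Int) (tb : PySem.Dict Int (List (List Int))) :
    List (List Int) :=
  if coin_start ≤ t then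
    (coins.takeWhile (fun c => c == t || decide (2 * c ≤ t))).flatMap
      (fun c => if c = t then [[c]] else (tb.getD (t - c) []).map (fun tail => c :: tail))
  else []

def combines_of_coins_alt (coin_start : Int) (target : Int) : List (List Int) :=
  if target < coin_start then []
  else
    let table :=
      (PySem.List.pyRange 1 (target + 1) 1).foldl
        (fun tb t => tb.insert t (entryAlt coin_start t tb)) PySem.Dict.empty
    table.getD target []

-- ===== PRECONDITION & SPEC =====
-- A's recursion nests about (target - max(coin_start,1)) calls deep (the coin-1 chain), so on
-- inputs beyond the interpreter's recursion limit Python A raises RecursionError; Pre_ excludes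
-- exactly those deep inputs (with a safety margin below the limit, where A cannot be observed to
-- return in any case), and nothing else.
def Pre_combines_of_coins (coin_start : Int) (target : Int) : Prop :=
  target - max coin_start 1 ≤ 9000
instance (coin_start : Int) (target : Int) : Decidable (Pre_combines_of_coins coin_start target) := by unfold Pre_combines_of_coins; infer_instance
def pvWitness_combines_of_coins : Int × Int := (1, 6)
def Spec_combines_of_coins (coin_start : Int) (target : Int) (out : List (List Int)) : Prop := out = combines_of_coins_alt coin_start target
instance (coin_start : Int) (target : Int) (out : List (List Int)) : Decidable (Spec_combines_of_coins coin_start target out) := by unfold Spec_combines_of_coins; infer_instance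

-- ===== CLAIM (what is proved, stated in full; the proofs are below) =====
def Claim_equal_combines_of_coins : Prop := ∀ (coin_start : Int) (target : Int), Dom_combines_of_coins coin_start target → Pre_combines_of_coins coin_start target → Spec_combines_of_coins coin_start target (combines_of_coins coin_start target)

-- ===== LEMMAS AND PROOFS =====

-- A's loop body, read against any table that is correct on all smaller sub-targets,
-- is exactly B's takeWhile/flatMap entry
theorem loop_eq_entry (coin_start t : Int) (tb : PySem.Dict Int (List (List Int)))
    (htb : ∀ r : Int, 1 ≤ r → r < t → tb.getD r [] = combines_of_coins coin_start r) :
    ∀ (cs : List Int) (h : ∀ c ∈ cs, 1 ≤ c),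
      combLoop coin_start t cs h =
        (cs.takeWhile (fun c => c == t || decide (2 * c ≤ t))).flatMap
          (fun c => if c = t then [[c]] else (tb.getD (t - c) []).map (fun tail => c :: tail)) := by
  intro cs
  induction cs with
  | nil => intro h; rw [combLoop.eq_def]; rfl
  | cons c rest ih =>
    intro h
    have hc : 1 ≤ c := h c List.mem_cons_self
    rw [combLoop.eq_def, List.takeWhile_cons]
    by_cases h0 : t - c = 0
    · have hct : c = t := by omega
      have hpred : (c == t || decide (2 * c ≤ t)) = true := by simp [hct]
      simp [hct, ih, List.flatMap_cons]
    · by_cases hlt : t - c < c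
      · have hpred : (c == t || decide (2 * c ≤ t)) = false := by
          simp only [Bool.or_eq_false_iff, beq_eq_false_iff_ne, decide_eq_false_iff_not]
          exact ⟨by omega, by omega⟩
        simp [h0, hlt, hpred]
      · have hpred : (c == t || decide (2 * c ≤ t)) = true := by
          simp only [Bool.or_eq_true, decide_eq_true_eq]
          right; omega
        have hct : ¬ c = t := by omega
        have hr : tb.getD (t - c) [] = combines_of_coins coin_start (t - c) :=
          htb _ (by omega) (by omega)
        simp [h0, hlt, hpred, hct, hr, ih, List.flatMap_cons]

-- A returns [] on every nonpositive target (coin 1 triggers the break at once)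
theorem comb_nonpos (coin_start target : Int) (ht : target ≤ 0) :
    combines_of_coins coin_start target = [] := by
  rw [combines_of_coins.eq_def]
  split
  · rw [loop_eq_entry coin_start target PySem.Dict.empty
      (by intro r h1 h2; exfalso; omega) coins coins_pos]
    have hp : ((1 : Int) == target || decide (2 * 1 ≤ target)) = false := by
      simp only [Bool.or_eq_false_iff, beq_eq_false_iff_ne, decide_eq_false_iff_not]
      exact ⟨by omega, by omega⟩
    simp only [coins, List.takeWhile_cons, hp]
    rfl
  · rfl

-- hence B's entry equals A's value, under the same table hypothesis
theorem entry_eq_comb (coin_start t : Int) (tb : PySem.Dict Int (List (List Int)))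
    (htb : ∀ r : Int, 1 ≤ r → r < t → tb.getD r [] = combines_of_coins coin_start r) :
    entryAlt coin_start t tb = combines_of_coins coin_start t := by
  rw [entryAlt, combines_of_coins.eq_def]
  split
  · exact (loop_eq_entry coin_start t tb htb coins coins_pos).symm
  · rfl

-- the table after processing sub-targets 1..n answers every lookup
theorem table_spec (coin_start : Int) (n : Nat) (t : Int) :
    ((PySem.List.pyRange 1 ((n : Int) + 1) 1).foldl
        (fun tb u => tb.insert u (entryAlt coin_start u tb)) PySem.Dict.empty).getD t []
      = if 1 ≤ t ∧ t ≤ (n : Int) then combines_of_coins coin_start t else [] := by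
  induction n generalizing t with
  | zero =>
    rw [PySem.List.pyRange_one_eq_nil (by omega)]
    simp only [List.foldl_nil, PySem.Dict.getD_empty]
    have : ¬ (1 ≤ t ∧ t ≤ ((0 : Nat) : Int)) := by omega
    rw [if_neg this]
  | succ n ih =>
    have hsplit : PySem.List.pyRange 1 ((↑(n + 1) : Int) + 1) 1
        = PySem.List.pyRange 1 ((n : Int) + 1) 1 ++ [(n : Int) + 1] := by
      have hc : ((↑(n + 1) : Int) + 1) = ((n : Int) + 1) + 1 := by push_cast; ring
      rw [hc, PySem.List.pyRange_one_succ_right (by omega)]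
    rw [hsplit, List.foldl_append, List.foldl_cons, List.foldl_nil, PySem.Dict.getD_insert]
    by_cases heq : t = (n : Int) + 1
    · rw [if_pos heq, entry_eq_comb coin_start _ _ (fun r h1 h2 => by
        rw [ih r, if_pos (by omega : 1 ≤ r ∧ r ≤ (n : Int))])]
      rw [if_pos (by omega : 1 ≤ t ∧ t ≤ ((↑(n + 1) : Int))), heq]
    · rw [if_neg heq, ih t]
      by_cases h1 : 1 ≤ t ∧ t ≤ (n : Int)
      · rw [if_pos h1, if_pos (by omega)]
      · rw [if_neg h1, if_neg (by omega)]

-- ===== VERDICT (by name: the statement is the Claim_ definition above) =====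
theorem combines_of_coins_spec : Claim_equal_combines_of_coins := by
  intro coin_start target _ _
  unfold Spec_combines_of_coins combines_of_coins_alt
  by_cases hg : target < coin_start
  · rw [if_pos hg, combines_of_coins.eq_def, if_neg (by omega)]
  · rw [if_neg hg]
    by_cases ht : target ≤ 0
    · rw [PySem.List.pyRange_one_eq_nil (by omega)]
      simp only [List.foldl_nil, PySem.Dict.getD_empty]
      exact comb_nonpos coin_start target ht
    · obtain ⟨n, hn⟩ : ∃ n : Nat, target = (n : Int) := ⟨target.toNat, by omega⟩
      subst hn
      rw [table_spec coin_start n, if_pos (by omega : 1 ≤ (n : Int) ∧ (n : Int) ≤ (n : Int))]
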